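-- pv_equiv track=rewrite | github.com/andrewbalercnx/OVC-VVP-Verifier | services/issuer/app/org/lei_generator.py | calculate_lei_check_digits
-- ===== SOURCE A (Python) =====
-- def calculate_lei_check_digits(base_lei: str) -> int:
--     """Calculate MOD 97-10 check digits for an LEI.
--
--     The check digit calculation follows ISO 7064 MOD 97-10:
--     1. Convert letters to numbers (A=10, B=11, ..., Z=35)
--     2. Append "00" to the end
--     3. Calculate 98 - (number MOD 97)
--
--     Args:
--         base_lei: The first 18 characters of the LEI (without check digits)
--
--     Returns:
--         The two check digits as an integer (0-97)
--     """
--     # Convert letters to numbers (A=10, B=11, ..., Z=35)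
--     numeric_str = ""
--     for char in base_lei:
--         if char.isalpha():
--             numeric_str += str(ord(char.upper()) - ord("A") + 10)
--         else:
--             numeric_str += char
--
--     # Append "00" for check digit calculation
--     numeric_str += "00"
--
--     # Calculate check digits: 98 - (number MOD 97)
--     check = 98 - (int(numeric_str) % 97)
--
--     return check
-- ===== SOURCE B (Python) =====
-- def calculate_lei_check_digits(base_lei: str) -> int:
--     """MOD 97-10 check digits via a streaming modular reduction: each character's
--     numeric value is obtained by ord arithmetic and folded into a running
--     remainder mod 97, so no big numeric string/integer is ever built."""
--     rem = 0
--     for ch in base_lei: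
--         if ch.isalpha():
--             rem = (rem * 100 + ord(ch.upper()) - 55) % 97
--         else:
--             rem = (rem * 10 + ord(ch) - 48) % 97
--     return 98 - rem * 100 % 97
-- ===== Notes on version B (the rewrite author's own statement) =====
-- stated objective: faster
-- what changed: B replaces A's build-a-big-numeric-string-then-int()%97 pipeline with a single arithmetic pass that folds each character's value (ord-based, 2-digit weight for letters, 1-digit for digits) into a running remainder mod 97, so no string and no large integer is ever constructed.
-- outside the precondition, e.g. on calculate_lei_check_digits('+5'): A returns 83, B returns 39; on calculate_lei_check_digits('1_0'): A returns 68, B returns 37; on calculate_lei_check_digits(' 12'): A returns 62, B returns 12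
import Mathlib
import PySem

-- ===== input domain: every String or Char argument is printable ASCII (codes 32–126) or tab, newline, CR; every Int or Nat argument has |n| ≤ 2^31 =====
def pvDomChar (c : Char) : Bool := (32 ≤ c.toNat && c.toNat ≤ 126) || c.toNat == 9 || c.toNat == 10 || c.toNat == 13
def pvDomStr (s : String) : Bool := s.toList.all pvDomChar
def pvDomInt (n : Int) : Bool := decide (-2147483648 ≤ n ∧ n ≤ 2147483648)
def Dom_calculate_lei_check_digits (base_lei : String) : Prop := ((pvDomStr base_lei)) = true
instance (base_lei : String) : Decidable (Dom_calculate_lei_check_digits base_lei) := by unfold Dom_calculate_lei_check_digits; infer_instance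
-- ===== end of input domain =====

-- B folds each character's ord-derived value into a running remainder mod 97 (one arithmetic
-- pass, no string or big integer built), instead of A's concatenate-then-int()%97 (objective: faster).

-- ===== PORT A =====
-- int(s) ported by hand, step for step after CPython's decimal parse (optional surrounding
-- whitespace, one sign, digits with single '_' separators between them; none = ValueError).
-- Exact on all inputs; hand-ported (rather than PySem.Int.ofChars?) so that the digit-string
-- characterization used by the proof can be stated about its recursion.
def pyIntGo : List Char → Bool → Nat → Option Nat
  | [], afterDigit, acc => if afterDigit then some acc else none
  | c :: rest, afterDigit, acc =>
    if c.isDigit then pyIntGo rest true (acc * 10 + (c.toNat - 48))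
    else if c = '_' ∧ afterDigit = true then
      match rest with
      | d :: tail => if d.isDigit then pyIntGo (d :: tail) false acc else none
      | [] => none
    else none

def pyIntDigits? : List Char → Option Nat
  | [] => none
  | cs => pyIntGo cs false 0

def pyInt? (s : List Char) : Option Int :=
  match ((s.dropWhile PySem.Int.isIntSpace).reverse.dropWhile PySem.Int.isIntSpace).reverse with
  | [] => none
  | c :: ds =>
    if c = '-' then (pyIntDigits? ds).map (fun n => -(n : Int))
    else if c = '+' then (pyIntDigits? ds).map (fun n => (n : Int))
    else (pyIntDigits? (c :: ds)).map (fun n => (n : Int))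

def calculate_lei_check_digits (base_lei : String) : Int :=
  -- numeric_str built up by appending str(ord(char.upper()) - ord("A") + 10) or the char
  let numeric_str : List Char :=
    base_lei.toList.foldl (fun acc c =>
      if PySem.Chars.isalpha c then
        acc ++ PySem.Int.toChars (((PySem.Chars.upperChar c).toNat : Int) - 65 + 10)
      else acc ++ [c]) []
  let numeric_str := numeric_str ++ ['0', '0']
  -- check = 98 - (int(numeric_str) % 97); Pre_ guarantees int() returns (getD unreachable)
  98 - PySem.Int.mod ((pyInt? numeric_str).getD 0) 97

-- ===== PORT B =====
-- the loop: rem = (rem * 100 + ord(ch.upper()) - 55) % 97 for letters,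
--           rem = (rem * 10 + ord(ch) - 48) % 97 otherwise
def pvAltLoop : Int → List Char → Int
  | rem, [] => rem
  | rem, c :: cs =>
    pvAltLoop
      (if PySem.Chars.isalpha c then
        PySem.Int.mod (rem * 100 + ((PySem.Chars.upperChar c).toNat : Int) - 55) 97
      else
        PySem.Int.mod (rem * 10 + (c.toNat : Int) - 48) 97) cs

def calculate_lei_check_digits_alt (base_lei : String) : Int :=
  98 - PySem.Int.mod (pvAltLoop 0 base_lei.toList * 100) 97

-- ===== PRECONDITION & SPEC =====
-- Pre_ restricts to ASCII-alphanumeric strings (the LEI alphabet). Excluded strings on which A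
-- still returns (leading whitespace, a sign, or underscores that int() tolerates after the
-- letter conversion, e.g. '+5', '1_0', ' 12') are artefacts of int()'s lenient parsing; B's
-- ord arithmetic gives a different value there. On everything else excluded, A raises ValueError.
def Pre_calculate_lei_check_digits (base_lei : String) : Prop :=
  base_lei.toList.all PySem.Chars.isalnum = true
instance (base_lei : String) : Decidable (Pre_calculate_lei_check_digits base_lei) := by
  unfold Pre_calculate_lei_check_digits; infer_instance
def pvWitness_calculate_lei_check_digits : String := "5493001KJTIIGC8Y1R"

def Spec_calculate_lei_check_digits (base_lei : String) (out : Int) : Prop :=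
  out = calculate_lei_check_digits_alt base_lei
instance (base_lei : String) (out : Int) : Decidable (Spec_calculate_lei_check_digits base_lei out) := by
  unfold Spec_calculate_lei_check_digits; infer_instance

-- ===== CLAIM (what is proved, stated in full; the proofs are below) =====
def Claim_equal_calculate_lei_check_digits : Prop :=
  ∀ (base_lei : String), Dom_calculate_lei_check_digits base_lei →
    Pre_calculate_lei_check_digits base_lei →
    Spec_calculate_lei_check_digits base_lei (calculate_lei_check_digits base_lei)

-- ===== LEMMAS AND PROOFS =====

-- the per-character digit piece A appends to numeric_str
def pvConv (c : Char) : List Char :=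
  if PySem.Chars.isalpha c then
    PySem.Int.toChars (((PySem.Chars.upperChar c).toNat : Int) - 65 + 10)
  else [c]

-- decimal value of a digit list, on top of accumulator a
def pvVal (a : Nat) (ds : List Char) : Nat :=
  ds.foldl (fun a c => a * 10 + (c.toNat - 48)) a

theorem pvVal_append (a : Nat) (xs ys : List Char) :
    pvVal a (xs ++ ys) = pvVal (pvVal a xs) ys := by
  simp [pvVal]

theorem pvVal_shift (a : Nat) (ds : List Char) :
    pvVal a ds = a * 10 ^ ds.length + pvVal 0 ds := by
  induction ds generalizing a with
  | nil => simp [pvVal]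
  | cons c ds ih =>
    simp only [pvVal, List.foldl_cons, List.length_cons] at *
    rw [ih (a * 10 + (c.toNat - 48)), ih (0 * 10 + (c.toNat - 48))]
    ring

theorem pyIntGo_digits (ds : List Char) (acc : Nat) (h : ∀ c ∈ ds, c.isDigit = true) :
    pyIntGo ds true acc = some (pvVal acc ds) := by
  induction ds generalizing acc with
  | nil => simp [pyIntGo, pvVal]
  | cons c ds ih =>
    have hc : c.isDigit = true := h c (List.mem_cons_self ..)
    rw [pyIntGo.eq_def]
    simp only [hc, if_pos, pvVal, List.foldl_cons]
    exact ih _ (fun d hd => h d (List.mem_cons_of_mem _ hd))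

theorem isIntSpace_of_digit (c : Char) (h : c.isDigit = true) :
    PySem.Int.isIntSpace c = false := by
  have hb : 48 ≤ c.toNat ∧ c.toNat ≤ 57 := by
    simp only [Char.isDigit, decide_eq_true_eq, Bool.and_eq_true] at h
    exact ⟨h.1, h.2⟩
  simp only [PySem.Int.isIntSpace, Bool.or_eq_false_iff, decide_eq_false_iff_not]
  refine ⟨⟨⟨⟨⟨?_, ?_⟩, ?_⟩, ?_⟩, ?_⟩, ?_⟩ <;> (rintro rfl; simp [Char.toNat] at hb)

theorem dropWhile_eq_self_of (p : Char → Bool) (l : List Char)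
    (h : ∀ c ∈ l, p c = false) : l.dropWhile p = l := by
  cases l with
  | nil => rfl
  | cons c l => simp [h c (List.mem_cons_self ..)]

theorem pyInt?_digits (ds : List Char) (hne : ds ≠ []) (h : ∀ c ∈ ds, c.isDigit = true) :
    pyInt? ds = some ((pvVal 0 ds : Nat) : Int) := by
  obtain ⟨d, rest, rfl⟩ : ∃ d rest, ds = d :: rest := by
    cases ds with
    | nil => exact absurd rfl hne
    | cons d rest => exact ⟨d, rest, rfl⟩
  have hsp : ∀ c ∈ d :: rest, PySem.Int.isIntSpace c = false :=
    fun c hc => isIntSpace_of_digit c (h c hc)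
  have hd : d.isDigit = true := h d (List.mem_cons_self ..)
  have hm : d ≠ '-' := by rintro rfl; simp [Char.isDigit] at hd
  have hp : d ≠ '+' := by rintro rfl; simp [Char.isDigit] at hd
  unfold pyInt?
  rw [dropWhile_eq_self_of _ _ hsp,
      dropWhile_eq_self_of _ _ (fun c hc => hsp c (List.mem_reverse.mp hc)),
      List.reverse_reverse]
  split
  case _ heq => exact absurd heq (by simp)
  case _ c ds' heq =>
    obtain ⟨rfl, rfl⟩ : d = c ∧ rest = ds' := by
      injection heq with h1 h2; exact ⟨h1, h2⟩
    rw [if_neg hm, if_neg hp]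
    have hpd : pyIntDigits? (d :: rest) = pyIntGo (d :: rest) false 0 := rfl
    rw [hpd, pyIntGo.eq_def]
    simp only [hd, if_pos]
    rw [pyIntGo_digits rest _ (fun c hc => h c (List.mem_cons_of_mem _ hc))]
    simp [pvVal]

theorem toChars_letter (v : Int) (h1 : 10 ≤ v) (h2 : v ≤ 35) :
    (∀ d ∈ PySem.Int.toChars v, d.isDigit = true) ∧
      (PySem.Int.toChars v).length = 2 ∧ ((pvVal 0 (PySem.Int.toChars v) : Nat) : Int) = v := by
  interval_cases v <;>
    exact ⟨by rw [← List.all_eq_true]; decide, by decide, by decide⟩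

theorem charLe (a b : Char) : (a ≤ b) ↔ a.toNat ≤ b.toNat := by
  rw [Char.le_def, UInt32.le_iff_toNat_le]; rfl
theorem charToNat_ofNat (n : Nat) (h : n < 55296) : (Char.ofNat n).toNat = n := by
  have hv : n.isValidChar := Or.inl h
  simp [Char.ofNat, hv, Char.toNat, Char.ofNatAux]
theorem upperChar_bounds (c : Char) (h : PySem.Chars.isalpha c = true) :
    65 ≤ (PySem.Chars.upperChar c).toNat ∧ (PySem.Chars.upperChar c).toNat ≤ 90 := by
  simp only [PySem.Chars.isalpha, PySem.Chars.isupper, PySem.Chars.islower,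
    Bool.or_eq_true, Bool.and_eq_true, decide_eq_true_eq, charLe] at h
  unfold PySem.Chars.upperChar PySem.Chars.islower
  by_cases hl : (decide ('a' ≤ c) && decide (c ≤ 'z')) = true
  · rw [if_pos hl]
    simp only [Bool.and_eq_true, decide_eq_true_eq, charLe] at hl
    have hc : c.toNat ≤ 122 := by simpa using hl.2
    have hc2 : 97 ≤ c.toNat := by simpa using hl.1
    rw [charToNat_ofNat _ (by omega)]
    omega
  · rw [if_neg hl]
    simp only [Bool.and_eq_true, decide_eq_true_eq, charLe, not_and_or, not_le] at hl
    rcases h with h | h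
    · constructor <;> simp_all
    · exfalso
      have h1 : 97 ≤ c.toNat := by simpa using h.1
      have h2 : c.toNat ≤ 122 := by simpa using h.2
      omega

theorem pvConv_digits (c : Char) (h : PySem.Chars.isalnum c = true) :
    (∀ d ∈ pvConv c, d.isDigit = true) ∧ pvConv c ≠ [] := by
  unfold pvConv
  by_cases ha : PySem.Chars.isalpha c = true
  · rw [if_pos ha]
    obtain ⟨h1, h2⟩ := upperChar_bounds c ha
    have hb1 : (10 : Int) ≤ ((PySem.Chars.upperChar c).toNat : Int) - 65 + 10 := by omega
    have hb2 : ((PySem.Chars.upperChar c).toNat : Int) - 65 + 10 ≤ 35 := by omega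
    obtain ⟨hd, hl, _⟩ := toChars_letter _ hb1 hb2
    exact ⟨hd, by intro hnil; rw [hnil] at hl; simp at hl⟩
  · rw [if_neg ha]
    have hdig : PySem.Chars.isdigit c = true := by
      simp only [PySem.Chars.isalnum, Bool.or_eq_true] at h
      tauto
    have : c.isDigit = true := by
      simpa [PySem.Chars.isdigit, Char.isDigit] using hdig
    exact ⟨by simpa using this, by simp⟩

theorem mod97 (a : Int) : PySem.Int.mod a 97 = a % 97 := by
  show Int.fmod a 97 = a % 97
  rw [Int.fmod_eq_emod_of_nonneg _ (by norm_num)]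

theorem foldA_flat (cs : List Char) (acc : List Char) :
    cs.foldl (fun acc c =>
      if PySem.Chars.isalpha c then
        acc ++ PySem.Int.toChars (((PySem.Chars.upperChar c).toNat : Int) - 65 + 10)
      else acc ++ [c]) acc = acc ++ cs.flatMap pvConv := by
  induction cs generalizing acc with
  | nil => simp
  | cons c cs ih =>
    simp only [List.foldl_cons, List.flatMap_cons]
    rw [ih]
    have : (if PySem.Chars.isalpha c then
        acc ++ PySem.Int.toChars (((PySem.Chars.upperChar c).toNat : Int) - 65 + 10)
      else acc ++ [c]) = acc ++ pvConv c := by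
      unfold pvConv; split <;> rfl
    rw [this, List.append_assoc]

theorem flat_digits (cs : List Char) (h : ∀ c ∈ cs, PySem.Chars.isalnum c = true) :
    ∀ d ∈ cs.flatMap pvConv, d.isDigit = true := by
  intro d hd
  obtain ⟨c, hc, hdc⟩ := List.mem_flatMap.mp hd
  exact (pvConv_digits c (h c hc)).1 d hdc

theorem emod_shift (a k v : Int) : ((a % 97) * k + v) % 97 = (a * k + v) % 97 := by
  rw [show a % 97 = a - 97 * (a / 97) from Int.emod_def ..]
  have h : (a - 97 * (a / 97)) * k + v = (a * k + v) + 97 * (-(a / 97) * k) := by ring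
  rw [h, Int.add_mul_emod_self_left]

-- B's loop invariant: starting from N % 97 it computes the decimal value of the
-- digit expansion (A's numeric_str for the same characters) modulo 97
theorem pvAltLoop_inv (cs : List Char) (h : ∀ c ∈ cs, PySem.Chars.isalnum c = true) (N : Nat) :
    pvAltLoop ((N : Int) % 97) cs = ((pvVal N (cs.flatMap pvConv) : Nat) : Int) % 97 := by
  induction cs generalizing N with
  | nil => simp [pvAltLoop, pvVal]
  | cons c cs ih =>
    have hc := h c (List.mem_cons_self ..)
    have hrest : ∀ x ∈ cs, PySem.Chars.isalnum x = true :=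
      fun x hx => h x (List.mem_cons_of_mem _ hx)
    have hstep : (if PySem.Chars.isalpha c then
          PySem.Int.mod (((N : Int) % 97) * 100 + ((PySem.Chars.upperChar c).toNat : Int) - 55) 97
        else
          PySem.Int.mod (((N : Int) % 97) * 10 + (c.toNat : Int) - 48) 97)
        = ((pvVal N (pvConv c) : Nat) : Int) % 97 := by
      by_cases ha : PySem.Chars.isalpha c = true
      · rw [if_pos ha]
        obtain ⟨hub1, hub2⟩ := upperChar_bounds c ha
        have hb1 : (10 : Int) ≤ ((PySem.Chars.upperChar c).toNat : Int) - 65 + 10 := by omega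
        have hb2 : ((PySem.Chars.upperChar c).toNat : Int) - 65 + 10 ≤ 35 := by omega
        obtain ⟨_, hlen, hval⟩ := toChars_letter _ hb1 hb2
        have hp : pvConv c = PySem.Int.toChars (((PySem.Chars.upperChar c).toNat : Int) - 65 + 10) := by
          unfold pvConv; rw [if_pos ha]
        rw [mod97, show ((N : Int) % 97) * 100 + ((PySem.Chars.upperChar c).toNat : Int) - 55
              = ((N : Int) % 97) * 100 + (((PySem.Chars.upperChar c).toNat : Int) - 55) by ring,
            emod_shift, hp, pvVal_shift N, hlen]
        push_cast
        rw [← hp, hp, hval]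
        ring_nf
      · rw [if_neg ha]
        have hp : pvConv c = [c] := by unfold pvConv; rw [if_neg ha]
        have hdig : c.isDigit = true := by
          have : PySem.Chars.isdigit c = true := by
            simp only [PySem.Chars.isalnum, Bool.or_eq_true] at hc; tauto
          simpa [PySem.Chars.isdigit, Char.isDigit] using this
        have hge : 48 ≤ c.toNat := by
          simp only [Char.isDigit, decide_eq_true_eq, Bool.and_eq_true] at hdig
          exact hdig.1
        have hv : pvVal N [c] = N * 10 + (c.toNat - 48) := by simp [pvVal]
        rw [mod97, show ((N : Int) % 97) * 10 + (c.toNat : Int) - 48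
              = ((N : Int) % 97) * 10 + ((c.toNat : Int) - 48) by ring,
            emod_shift, hp, hv]
        push_cast [hge]
        ring_nf
    rw [pvAltLoop, hstep,
        show ((pvVal N (pvConv c) : Nat) : Int) % 97
          = (((pvVal N (pvConv c) : Nat) : Int)) % 97 from rfl,
        ih hrest (pvVal N (pvConv c)), List.flatMap_cons, pvVal_append]

-- ===== VERDICT (by name: the statement is the Claim_ definition above) =====
theorem calculate_lei_check_digits_spec : Claim_equal_calculate_lei_check_digits := by
  intro s hdom hpre
  unfold Spec_calculate_lei_check_digits calculate_lei_check_digits calculate_lei_check_digits_alt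
  have hall : ∀ c ∈ s.toList, PySem.Chars.isalnum c = true := by
    unfold Pre_calculate_lei_check_digits at hpre
    exact fun c hc => List.all_eq_true.mp hpre c hc
  rw [foldA_flat s.toList []]
  simp only [List.nil_append]
  have hdig2 : ∀ d ∈ s.toList.flatMap pvConv ++ ['0', '0'], d.isDigit = true := by
    intro d hd
    rcases List.mem_append.mp hd with h1 | h1
    · exact flat_digits _ hall d h1
    · rcases (by simpa using h1 : d = '0' ∨ d = '0') with rfl | rfl <;> decide
  rw [pyInt?_digits _ (by simp) hdig2]
  simp only [Option.getD_some]
  have hval : pvVal 0 (s.toList.flatMap pvConv ++ ['0', '0'])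
      = pvVal 0 (s.toList.flatMap pvConv) * 100 := by
    rw [pvVal_append]
    simp only [pvVal, List.foldl_cons, List.foldl_nil]
    have h0 : '0'.toNat - 48 = 0 := by decide
    rw [h0]
    ring
  have hB := pvAltLoop_inv s.toList hall 0
  simp only [Nat.cast_zero, Int.zero_emod] at hB
  rw [hB, hval, mod97, mod97]
  have h2 := emod_shift ((pvVal 0 (s.toList.flatMap pvConv) : Nat) : Int) 100 0
  simp only [add_zero] at h2
  rw [h2]
  push_cast
  ring_nf
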